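-- pv_equiv track=rewrite | github.com/vfxGer/pretty-numbers | pretty_numbers/pretty_numbers.py | getPrettyNumbersText
-- ===== SOURCE A (Python) =====
-- from typing import Any, Sequence, Set
--
-- def getPrettyTextFromSet(frames: Set[int]) -> str:
--     """
--     Given a set of integers returns a more human readable string
--     """
--     if not frames:
--         return ""
--     if len(frames) == 1:
--         framesSet = frames.copy()
--         return str(framesSet.pop())
--     framesList = list(frames)
--     framesList.sort(reverse=True)
--     lastNum = framesList.pop()
--     currentStrStart = lastNum
--     pStr = str(lastNum)
--     while framesList:
--         currNum = framesList.pop()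
--         if not lastNum + 1 == currNum:
--             if not lastNum == currentStrStart:
--                 pStr = pStr + "-" + str(lastNum)
--             pStr = pStr + "," + str(currNum)
--             currentStrStart = currNum
--         lastNum = currNum
--     if currentStrStart != currNum:
--         pStr = pStr + "-" + str(lastNum)
--     return pStr
--
-- def getPrettyNumbersText(list_of_strings: Sequence[Any]) -> str:
--     nums = set()
--     text_result = set()
--     for i in list_of_strings:
--         try:
--             nums.add(int(i))
--         except (TypeError, ValueError):
--             text_result.add(str(i))
--     result = getPrettyTextFromSet(nums)
--     if not text_result:
--         return result
--     texts = list(text_result)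
--     texts.sort()
--     final_text = ",".join(texts)
--     if result:
--         return result + "," + final_text
--     return final_text
-- ===== SOURCE B (Python) =====
-- from itertools import groupby
-- from typing import Any, Sequence
--
--
-- def getPrettyNumbersText(list_of_strings: Sequence[Any]) -> str:
--     nums = set()
--     text_result = set()
--     for i in list_of_strings:
--         try:
--             nums.add(int(i))
--         except (TypeError, ValueError):
--             text_result.add(str(i))
--     runs = []
--     for _, group in groupby(enumerate(sorted(nums)), key=lambda p: p[1] - p[0]):
--         g = list(group)
--         start, end = g[0][1], g[-1][1]
--         runs.append(str(start) if start == end else f"{start}-{end}")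
--     parts = [",".join(runs)] if runs else []
--     if text_result:
--         parts.append(",".join(sorted(text_result)))
--     return ",".join(parts)
-- ===== Notes on version B (the rewrite author's own statement) =====
-- stated objective: idiomatic
-- what changed: The hand-rolled reverse-sort-and-pop loop that grows the result string with mutable run trackers and a trailing-close fixup is replaced by sorting ascending, grouping into maximal consecutive runs with itertools.groupby keyed by value-minus-index, formatting each run, and joining; the empty/single-element special cases and the final if-chain disappear into list joins.
import Mathlib
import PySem

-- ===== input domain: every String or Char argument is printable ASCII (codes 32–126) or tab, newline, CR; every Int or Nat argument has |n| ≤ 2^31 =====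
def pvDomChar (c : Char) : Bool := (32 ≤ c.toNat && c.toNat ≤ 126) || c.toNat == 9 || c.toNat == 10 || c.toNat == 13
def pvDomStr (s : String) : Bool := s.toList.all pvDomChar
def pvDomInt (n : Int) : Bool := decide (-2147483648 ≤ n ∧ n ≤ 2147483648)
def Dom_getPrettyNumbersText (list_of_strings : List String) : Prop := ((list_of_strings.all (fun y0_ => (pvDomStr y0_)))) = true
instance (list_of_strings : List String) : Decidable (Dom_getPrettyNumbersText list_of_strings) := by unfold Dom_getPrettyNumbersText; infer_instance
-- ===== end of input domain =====

-- B replaces A's reverse-sort-and-pop string-accumulation loop by groupby-style run grouping,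
-- per-run formatting and joins (objective: more idiomatic); return values agree on every input.

-- ===== PORT A =====
-- the int/text partitioning loop, literally shared by A and B (their Python loops are identical)
def pvParse (list_of_strings : List String) : PySem.Set Int × PySem.Set String :=
  list_of_strings.foldl
    (fun st i =>
      match PySem.Int.ofStr? i with
      | some n => (PySem.Set.add st.1 n, st.2)      -- nums.add(int(i))
      | none => (st.1, PySem.Set.add st.2 i))       -- except ValueError: text_result.add(str(i))
    (PySem.Set.empty, PySem.Set.empty)

-- the 'while framesList:' loop; pop() from the end = getLast?/dropLast; state (lastNum, currentStrStart, pStr, currNum)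
def pvAWhile (fl : List Int) (lastNum css : Int) (pStr : String) (currNum : Int) :
    Int × Int × String × Int :=
  match h : fl.getLast? with
  | none => (lastNum, css, pStr, currNum)
  | some c =>
      if ¬(lastNum + 1 = c) then
        pvAWhile fl.dropLast c c
          ((if ¬(lastNum = css) then pStr ++ "-" ++ PySem.Int.toStr lastNum else pStr)
            ++ "," ++ PySem.Int.toStr c) c
      else
        pvAWhile fl.dropLast c css pStr c
termination_by fl.length
decreasing_by
  all_goals
    cases fl with
    | nil => simp at h
    | cons a t => simp [List.length_dropLast]

def getPrettyTextFromSet (frames : PySem.Set Int) : String :=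
  match frames with
  | [] => ""                                        -- if not frames: return ""
  | [x] => PySem.Int.toStr x                        -- if len(frames) == 1: return str(framesSet.pop())
  | _ =>
      let framesList := PySem.List.sorted frames (fun x => x) true
      match framesList.getLast? with                -- lastNum = framesList.pop()
      | none => ""                                  -- unreachable: frames has ≥ 2 elements
      | some lastNum =>
          match pvAWhile framesList.dropLast lastNum lastNum (PySem.Int.toStr lastNum) lastNum with
          | (last, css, pStr, curr) =>
              if ¬(css = curr) then pStr ++ "-" ++ PySem.Int.toStr last else pStr

def getPrettyNumbersText (list_of_strings : List String) : String :=
  let st := pvParse list_of_strings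
  let result := getPrettyTextFromSet st.1
  if st.2 = [] then result                          -- if not text_result: return result
  else
    let final_text := PySem.Str.join "," (PySem.List.sorted st.2 (fun x => x) false)
    if ¬(result = "") then result ++ "," ++ final_text else final_text

-- ===== PORT B =====
-- itertools.groupby (adjacent elements with equal key), ported by hand (exact: groups of maximal
-- adjacent equal-key stretches, in order, as lists)
def pvGroupByKey (key : Int × Int → Int) : List (Int × Int) → List (List (Int × Int))
  | [] => []
  | [p] => [[p]]
  | p :: q :: rest =>
      match pvGroupByKey key (q :: rest) with
      | (r :: g) :: gs =>
          if key p = key r then (p :: r :: g) :: gs else [p] :: (r :: g) :: gs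
      | gs => [p] :: gs                             -- unreachable: groups are nonempty

-- str(start) if start == end else f"{start}-{end}" with start = g[0][1], end = g[-1][1]
def pvFmtRun (g : List (Int × Int)) : String :=
  match g, g.getLast? with
  | (_, s) :: _, some (_, e) =>
      if s = e then PySem.Int.toStr s else PySem.Int.toStr s ++ "-" ++ PySem.Int.toStr e
  | _, _ => ""                                      -- unreachable: groups are nonempty

def getPrettyNumbersText_alt (list_of_strings : List String) : String :=
  let st := pvParse list_of_strings
  let runs :=
    (pvGroupByKey (fun p => p.2 - p.1)
        (PySem.List.enumerate (PySem.List.sorted st.1 (fun x => x) false))).map pvFmtRun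
  let parts :=
    (if runs = [] then [] else [PySem.Str.join "," runs]) ++
      (if st.2 = [] then []
       else [PySem.Str.join "," (PySem.List.sorted st.2 (fun x => x) false)])
  PySem.Str.join "," parts

-- ===== PRECONDITION & SPEC =====
def Spec_getPrettyNumbersText (list_of_strings : List String) (out : String) : Prop := out = getPrettyNumbersText_alt list_of_strings
instance (list_of_strings : List String) (out : String) : Decidable (Spec_getPrettyNumbersText list_of_strings out) := by unfold Spec_getPrettyNumbersText; infer_instance

-- ===== CLAIM (what is proved, stated in full; the proofs are below) =====
def Claim_equal_getPrettyNumbersText : Prop := ∀ (list_of_strings : List String), Dom_getPrettyNumbersText list_of_strings → Spec_getPrettyNumbersText list_of_strings (getPrettyNumbersText list_of_strings)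

-- ===== LEMMAS AND PROOFS =====

-- forward (cons-structural) reading of pvAWhile's pop-from-the-end loop
def pvFwd : List Int → Int → Int → String → Int → Int × Int × String × Int
  | [], lastNum, css, pStr, currNum => (lastNum, css, pStr, currNum)
  | c :: m, lastNum, css, pStr, _ =>
      if ¬(lastNum + 1 = c) then
        pvFwd m c c
          ((if ¬(lastNum = css) then pStr ++ "-" ++ PySem.Int.toStr lastNum else pStr)
            ++ "," ++ PySem.Int.toStr c) c
      else
        pvFwd m c css pStr c

-- (start, end) pairs of the maximal consecutive runs of a list
def runsOf : List Int → List (Int × Int)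
  | [] => []
  | [a] => [(a, a)]
  | a :: b :: m =>
      match runsOf (b :: m) with
      | (s, e) :: rs => if a + 1 = b then (a, e) :: rs else (a, a) :: (s, e) :: rs
      | [] => [(a, a)]                              -- unreachable

-- what pvGroupByKey computes on an enumerated list (same recursion, explicit indices)
def runsGroups : List Int → Int → List (List (Int × Int))
  | [], _ => []
  | [a], s => [[(s, a)]]
  | a :: b :: m, s =>
      match runsGroups (b :: m) (s + 1) with
      | g :: gs => if a + 1 = b then ((s, a) :: g) :: gs else [(s, a)] :: g :: gs
      | [] => [[(s, a)]]                            -- unreachable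

def sndRange : List (Int × Int) → Int × Int
  | [] => (0, 0)
  | (_, a) :: g => (a, ((g.getLast?).map Prod.snd).getD a)

def fmtPair (p : Int × Int) : String :=
  if p.1 = p.2 then PySem.Int.toStr p.1
  else PySem.Int.toStr p.1 ++ "-" ++ PySem.Int.toStr p.2

def renderStrs : List String → String
  | [] => ""
  | t :: ts => "," ++ t ++ renderStrs ts

def renderRest (css : Int) : List (Int × Int) → String
  | [] => ""
  | (_, e) :: rs => (if ¬(css = e) then "-" ++ PySem.Int.toStr e else "") ++ renderStrs (rs.map fmtPair)
theorem pvAWhile_reverse (m : List Int) : ∀ lastNum css pStr currNum,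
    pvAWhile m.reverse lastNum css pStr currNum = pvFwd m lastNum css pStr currNum := by
  induction m with
  | nil => intro lastNum css pStr currNum; rw [pvAWhile]; simp [pvFwd]
  | cons a m ih =>
    intro lastNum css pStr currNum
    rw [pvAWhile]
    simp only [List.reverse_cons, List.dropLast_concat]
    split
    next h => rw [List.getLast?_reverse] at h; simp at h
    next c h =>
      rw [List.getLast?_reverse] at h
      obtain rfl : a = c := by simpa using h
      simp only [pvFwd]
      split <;> exact ih ..
theorem runsOf_head (c : Int) (m : List Int) : ∃ e rs, runsOf (c :: m) = (c, e) :: rs := by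
  cases m with
  | nil => exact ⟨c, [], rfl⟩
  | cons b m' =>
    rw [runsOf]
    rcases hr : runsOf (b :: m') with _ | ⟨⟨s, e⟩, rs⟩
    · exact ⟨c, [], rfl⟩
    · by_cases hb : c + 1 = b
      · exact ⟨e, rs, by simp [hb]⟩
      · exact ⟨c, (s, e) :: rs, by simp [hb]⟩

theorem runsGroups_head (b : Int) (m : List Int) (s : Int) :
    ∃ g gs, runsGroups (b :: m) s = ((s, b) :: g) :: gs := by
  cases m with
  | nil => exact ⟨[], [], rfl⟩
  | cons c m' =>
    rw [runsGroups]
    rcases hr : runsGroups (c :: m') (s + 1) with _ | ⟨g, gs⟩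
    · exact ⟨[], [], rfl⟩
    · by_cases hb : b + 1 = c
      · exact ⟨g, gs, by simp [hb]⟩
      · exact ⟨[], g :: gs, by simp [hb]⟩
def pvFinish : Int × Int × String × Int → String
  | (last, css, p, curr) => if ¬(css = curr) then p ++ "-" ++ PySem.Int.toStr last else p

theorem pvFwd_render (m : List Int) : ∀ lastNum css pStr,
    pvFinish (pvFwd m lastNum css pStr lastNum)
      = pStr ++ renderRest css (runsOf (lastNum :: m)) := by
  induction m with
  | nil =>
    intro l css p
    simp only [pvFwd, pvFinish, runsOf, renderRest, List.map_nil, renderStrs]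
    by_cases h : css = l <;> simp [h, String.append_assoc]
  | cons c m ih =>
    intro l css p
    obtain ⟨e, rs, hr⟩ := runsOf_head c m
    rw [runsOf, hr]
    by_cases hc : l + 1 = c
    · simp only [pvFwd]
      rw [if_neg (not_not_intro hc), if_pos hc, ih c css p, hr]
      simp [renderRest]
    · simp only [pvFwd]
      rw [if_pos hc, if_neg hc, ih c c _, hr]
      simp only [renderRest, List.map_cons, renderStrs]
      by_cases h1 : l = css <;> by_cases h2 : c = e <;>
        simp [h1, h2, eq_comm, fmtPair, String.append_assoc]
theorem groupBy_enumerate (m : List Int) : ∀ s,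
    pvGroupByKey (fun p => p.2 - p.1) (PySem.List.enumerate m s) = runsGroups m s := by
  induction m with
  | nil => intro s; simp [PySem.List.enumerate, pvGroupByKey, runsGroups]
  | cons a m ih =>
    intro s
    cases m with
    | nil => simp [PySem.List.enumerate, pvGroupByKey, runsGroups]
    | cons b m' =>
      obtain ⟨g, gs, hg⟩ := runsGroups_head b m' (s + 1)
      have he : PySem.List.enumerate (a :: b :: m') s
          = (s, a) :: PySem.List.enumerate (b :: m') (s + 1) := by
        simp [PySem.List.enumerate]
      rw [he, runsGroups, hg]
      have he2 : PySem.List.enumerate (b :: m') (s + 1)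
          = (s + 1, b) :: PySem.List.enumerate m' (s + 1 + 1) := by
        simp [PySem.List.enumerate]
      rw [he2]
      rw [pvGroupByKey, ← he2, ih (s + 1), hg]
      by_cases hb : a + 1 = b
      · have h2 : a - s = b - (s + 1) := by omega
        simp [h2, hb]
      · have h2 : ¬(a - s = b - (s + 1)) := by omega
        simp [h2, hb]
theorem getLast?_snd_getD (p : Int × Int) (g : List (Int × Int)) (a : Int) :
    (((p :: g).getLast?).map Prod.snd).getD a = ((g.getLast?).map Prod.snd).getD p.2 := by
  cases g with
  | nil => simp
  | cons x g2 =>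
    rw [List.getLast?_cons_cons]
    cases hg : (x :: g2).getLast? with
    | none => simp at hg
    | some q => simp

theorem runsGroups_sndRange (m : List Int) : ∀ s,
    (runsGroups m s).map sndRange = runsOf m := by
  induction m with
  | nil => intro s; simp [runsGroups, runsOf]
  | cons a m ih =>
    intro s
    cases m with
    | nil => simp [runsGroups, runsOf, sndRange]
    | cons b m' =>
      obtain ⟨g, gs, hg⟩ := runsGroups_head b m' (s + 1)
      have hruns : runsOf (b :: m') = sndRange ((s + 1, b) :: g) :: gs.map sndRange := by
        rw [← ih (s + 1), hg, List.map_cons]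
      rw [runsGroups, runsOf, hg, hruns]
      by_cases hb : a + 1 = b
      · simp only [if_pos hb, sndRange, List.map_cons]
        rw [getLast?_snd_getD]
      · simp only [if_neg hb, sndRange, List.map_cons]
        simp

theorem runsGroups_ne_nil (m : List Int) : ∀ s, ∀ g ∈ runsGroups m s, g ≠ [] := by
  induction m with
  | nil => intro s g hg; simp [runsGroups] at hg
  | cons a m ih =>
    intro s g hg
    cases m with
    | nil => simp [runsGroups] at hg; simp [hg]
    | cons b m' =>
      obtain ⟨g0, gs, h0⟩ := runsGroups_head b m' (s + 1)
      rw [runsGroups, h0] at hg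
      have hg2 : g ∈ (if a + 1 = b then ((s, a) :: (s + 1, b) :: g0) :: gs
          else [(s, a)] :: ((s + 1, b) :: g0) :: gs) := hg
      clear hg
      by_cases hb : a + 1 = b
      · rw [if_pos hb] at hg2
        rcases List.mem_cons.mp hg2 with rfl | hmem
        · simp
        · exact ih (s + 1) g (by rw [h0]; exact List.mem_cons_of_mem _ hmem)
      · rw [if_neg hb] at hg2
        rcases List.mem_cons.mp hg2 with rfl | hmem
        · simp
        · exact ih (s + 1) g (by rw [h0]; exact hmem)

theorem fmtRun_eq_fmtPair (g : List (Int × Int)) (h : g ≠ []) :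
    pvFmtRun g = fmtPair (sndRange g) := by
  match g with
  | [] => exact absurd rfl h
  | [(i, a)] => simp [pvFmtRun, sndRange, fmtPair]
  | (i, a) :: (j, b) :: t =>
    cases hq : ((j, b) :: t).getLast? with
    | none => simp at hq
    | some q =>
      simp only [pvFmtRun, List.getLast?_cons_cons, hq, sndRange, fmtPair]
      simp

theorem toStr_ne_empty (n : Int) : PySem.Int.toStr n ≠ "" := by
  intro h
  have := congrArg String.toList h
  rw [PySem.Int.toStr, String.toList_ofList] at this
  rw [PySem.Int.toChars] at this
  split at this
  · simp at this
  · have hp : 0 < (Nat.toDigits 10 n.toNat).length := Nat.length_toDigits_pos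
    rw [this] at hp
    simp at hp

theorem append_ne_empty_left (a b : String) (h : a ≠ "") : a ++ b ≠ "" := by
  intro he
  apply h
  have := congrArg String.toList he
  rw [String.toList_append] at this
  have h0 : a.toList ++ b.toList = [] := by
    rw [← String.toList_append, he]; rfl
  rcases List.append_eq_nil_iff.mp h0 with ⟨h1, _⟩
  apply String.toList_inj.mp
  simpa using h1

theorem fmtPair_ne_empty (p : Int × Int) : fmtPair p ≠ "" := by
  rw [fmtPair]
  split
  · exact toStr_ne_empty _
  · exact append_ne_empty_left _ _ (append_ne_empty_left _ _ (toStr_ne_empty _))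
theorem join_cons (x : String) (xs : List String) :
    PySem.Str.join "," (x :: xs) = x ++ renderStrs xs := by
  induction xs generalizing x with
  | nil =>
    apply String.toList_inj.mp
    rw [PySem.Str.toList_join, String.toList_append]
    simp [PySem.Chars.join, List.intercalate, renderStrs]
  | cons y ys ih =>
    apply String.toList_inj.mp
    rw [PySem.Str.toList_join, String.toList_append]
    simp only [List.map_cons, PySem.Chars.join]
    rw [show List.intercalate (",".toList) (x.toList :: y.toList :: ys.map String.toList)
        = x.toList ++ ",".toList ++ List.intercalate ",".toList (y.toList :: ys.map String.toList)
        from by simp [List.intercalate, List.intersperse]]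
    have h2 := congrArg String.toList (ih y)
    rw [PySem.Str.toList_join] at h2
    simp only [PySem.Chars.join, List.map_cons] at h2
    rw [h2, renderStrs]
    simp [String.toList_append, List.append_assoc]
theorem runs_eq (nums : List Int) :
    (pvGroupByKey (fun p => p.2 - p.1)
        (PySem.List.enumerate (PySem.List.sorted nums (fun x => x) false))).map pvFmtRun
      = (runsOf (PySem.List.sorted nums (fun x => x) false)).map fmtPair := by
  rw [groupBy_enumerate]
  calc (runsGroups (PySem.List.sorted nums (fun x => x) false) 0).map pvFmtRun
      = (runsGroups (PySem.List.sorted nums (fun x => x) false) 0).map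
          (fun g => fmtPair (sndRange g)) :=
        List.map_congr_left (fun g hg => fmtRun_eq_fmtPair g (runsGroups_ne_nil _ 0 g hg))
    _ = ((runsGroups (PySem.List.sorted nums (fun x => x) false) 0).map sndRange).map fmtPair := by
        rw [List.map_map]; rfl
    _ = (runsOf (PySem.List.sorted nums (fun x => x) false)).map fmtPair := by
        rw [runsGroups_sndRange]

theorem sorted_strict (nums : List Int) (hnd : nums.Nodup) :
    (PySem.List.sorted nums (fun x => x) false).Pairwise (· < ·) := by
  have hle := PySem.List.sorted_pairwise nums (fun x => x)
  have hnd2 : (PySem.List.sorted nums (fun x => x) false).Nodup :=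
    (PySem.List.sorted_perm nums (fun x => x) false).nodup_iff.mpr hnd
  exact (hle.and hnd2).imp (fun h => lt_of_le_of_ne h.1 h.2)

theorem numbers_eq (nums : List Int) (hnd : nums.Nodup) :
    getPrettyTextFromSet nums
      = PySem.Str.join "," ((runsOf (PySem.List.sorted nums (fun x => x) false)).map fmtPair) := by
  match nums with
  | [] =>
    have h0 : PySem.List.sorted ([] : List Int) (fun x => x) false = [] :=
      PySem.List.sorted_eq_of_perm_of_pairwise_lt _ _ _ (by simp) (by simp)
    rw [h0]
    simp only [runsOf, List.map_nil]
    rfl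
  | [x] =>
    have h1 : PySem.List.sorted [x] (fun x => x) false = [x] :=
      PySem.List.sorted_eq_of_perm_of_pairwise_lt _ _ _ (List.Perm.refl _) (by simp)
    rw [h1]
    simp only [runsOf, List.map_cons, List.map_nil]
    rw [join_cons]
    simp [getPrettyTextFromSet, fmtPair, renderStrs, String.append_empty]
  | a :: b :: t =>
    have hstrict := sorted_strict (a :: b :: t) hnd
    have hlen : (PySem.List.sorted (a :: b :: t) (fun x => x) false).length = t.length + 2 := by
      rw [(PySem.List.sorted_perm (a :: b :: t) (fun x => x) false).length_eq]
      simp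
    obtain ⟨x, y, r, hs⟩ : ∃ x y r, PySem.List.sorted (a :: b :: t) (fun x => x) false = x :: y :: r := by
      rcases hsp : PySem.List.sorted (a :: b :: t) (fun x => x) false with _ | ⟨x, _ | ⟨y, r⟩⟩
      · rw [hsp] at hlen; simp at hlen
      · rw [hsp] at hlen; simp at hlen
      · exact ⟨x, y, r, rfl⟩
    have hrev : PySem.List.sorted (a :: b :: t) (fun x => x) true = (x :: y :: r).reverse := by
      apply PySem.List.sorted_rev_eq_of_perm_of_pairwise_gt
      · exact (List.reverse_perm _).trans (hs ▸ PySem.List.sorted_perm _ _ _)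
      · rw [List.pairwise_reverse]
        exact hs ▸ hstrict
    rw [hs] at hstrict
    simp only [getPrettyTextFromSet]
    rw [hrev, List.getLast?_reverse]
    simp only [List.head?_cons, List.dropLast_reverse, List.tail_cons]
    rw [pvAWhile_reverse]
    have hrender := pvFwd_render (y :: r) x x (PySem.Int.toStr x)
    rcases hpv : pvFwd (y :: r) x x (PySem.Int.toStr x) x with ⟨l4, c4, p4, u4⟩
    rw [hpv] at hrender
    simp only [pvFinish] at hrender
    rw [hs]
    obtain ⟨e, rs, hr⟩ := runsOf_head x (y :: r)
    rw [hr] at hrender ⊢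
    simp only [List.map_cons]
    rw [join_cons]
    simp only [renderRest] at hrender
    rw [hrender]
    by_cases hxe : x = e <;>
      simp [fmtPair, hxe, String.append_assoc]

theorem parse_nodup_aux (l : List String) : ∀ st : PySem.Set Int × PySem.Set String,
    st.1.Nodup →
    (l.foldl
      (fun st i =>
        match PySem.Int.ofStr? i with
        | some n => (PySem.Set.add st.1 n, st.2)
        | none => (st.1, PySem.Set.add st.2 i)) st).1.Nodup := by
  induction l with
  | nil => intro st h; exact h
  | cons i l ih =>
    intro st h
    rw [List.foldl_cons]
    cases hi : PySem.Int.ofStr? i with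
    | some n => simp; exact ih _ (PySem.Set.nodup_add _ _ h)
    | none => simp; exact ih _ h


theorem parse_nodup (list_of_strings : List String) : (pvParse list_of_strings).1.Nodup := by
  exact parse_nodup_aux list_of_strings (PySem.Set.empty, PySem.Set.empty) (by simp [PySem.Set.empty])

theorem join_pair (xa xb : String) :
    PySem.Str.join "," [xa, xb] = xa ++ "," ++ xb := by
  rw [join_cons]
  simp [renderStrs, String.append_assoc, String.append_empty]

theorem join_single (xa : String) : PySem.Str.join "," [xa] = xa := by
  rw [join_cons]; simp [renderStrs, String.append_empty]

theorem pv_final_eq : ∀ l, getPrettyNumbersText l = getPrettyNumbersText_alt l := by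
  intro l
  have hnd := parse_nodup l
  simp only [getPrettyNumbersText, getPrettyNumbersText_alt]
  rw [runs_eq, numbers_eq _ hnd]
  rcases hru : runsOf (PySem.List.sorted (pvParse l).1 (fun x => x) false) with _ | ⟨p0, prest⟩
  · -- nums sorted empty: result is ""
    simp only [List.map_nil]
    have hjz : PySem.Str.join "," ([] : List String) = "" := rfl
    by_cases ht : (pvParse l).2 = [] <;>
      simp [ht, hjz, join_single]
  · simp only [List.map_cons]
    have hne : PySem.Str.join "," (fmtPair p0 :: prest.map fmtPair) ≠ "" := by
      rw [join_cons]
      exact append_ne_empty_left _ _ (fmtPair_ne_empty p0)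
    by_cases ht : (pvParse l).2 = []
    · simp [ht, join_single]
    · simp [ht, hne, join_pair]

-- ===== VERDICT (by name: the statement is the Claim_ definition above) =====
theorem getPrettyNumbersText_spec : Claim_equal_getPrettyNumbersText := by
  intro list_of_strings _
  unfold Spec_getPrettyNumbersText
  exact pv_final_eq list_of_strings
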